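-- pv_equiv track=rewrite | github.com/su-tiger/Paper-writing-Agent | src/evaluation/workflow_evaluator.py | _infer_transitions
-- ===== SOURCE A (Python) =====
-- from typing import Dict, Any, List, Optional
--
-- def _infer_transitions(node_sequence: List[str]) -> Dict[str, List[str]]:
--     """从节点序列推断转移关系"""
--     transitions = {}
--     for i in range(len(node_sequence) - 1):
--         current = node_sequence[i]
--         next_node = node_sequence[i + 1]
--         if current not in transitions:
--             transitions[current] = []
--         if next_node not in transitions[current]:
--             transitions[current].append(next_node)
--     return transitions
-- ===== SOURCE B (Python) =====
-- from typing import Dict, Any, List, Optional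
--
-- def _infer_transitions(node_sequence: List[str]) -> Dict[str, List[str]]:
--     """Group-by-key decomposition: materialise the consecutive pairs once, take the
--     first-occurrence-ordered distinct source nodes, and for each source run an
--     independent filtering scan over all pairs to collect its distinct successors."""
--     pairs = list(zip(node_sequence, node_sequence[1:]))
--     keys = list(dict.fromkeys(c for c, _ in pairs))
--     return {c: list(dict.fromkeys(n for cc, n in pairs if cc == c))
--             for c in keys}
-- ===== Notes on version B (the rewrite author's own statement) =====
-- stated objective: alternative
-- what changed: Replaces A's single incremental pass that grows a dict with an interleaved membership check by a group-by decomposition: materialise all consecutive pairs, compute the ordered distinct source nodes, then for each source run an independent filtering scan over the pair list to collect its distinct successors.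
import Mathlib
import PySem

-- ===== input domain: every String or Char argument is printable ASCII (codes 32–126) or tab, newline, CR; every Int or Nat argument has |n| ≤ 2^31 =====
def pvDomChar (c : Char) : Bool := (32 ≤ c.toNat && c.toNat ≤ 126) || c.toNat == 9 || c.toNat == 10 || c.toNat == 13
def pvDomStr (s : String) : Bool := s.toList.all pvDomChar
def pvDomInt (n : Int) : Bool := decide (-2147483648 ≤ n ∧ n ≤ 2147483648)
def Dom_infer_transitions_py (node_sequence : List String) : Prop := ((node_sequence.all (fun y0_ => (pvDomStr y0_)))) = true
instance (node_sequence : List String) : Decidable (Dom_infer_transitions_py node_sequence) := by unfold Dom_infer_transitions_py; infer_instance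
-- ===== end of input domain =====

-- B replaces A's single incremental dict-building pass by a group-by decomposition:
-- the ordered distinct source nodes are computed first, then each source gets an
-- independent filtering scan over the pair list (objective: alternative; not faster).

-- ===== PORT A =====
-- indices i and i+1 are always in range (0 ≤ i ≤ len-2), so pyGetD with a dummy default is exact
def infer_transitions_py (node_sequence : List String) : List (String × List String) :=
  ((PySem.List.pyRange 0 (PySem.List.len node_sequence - 1) 1).foldl
    (fun transitions i =>
      let current := PySem.List.pyGetD node_sequence i ""
      let next_node := PySem.List.pyGetD node_sequence (i + 1) ""
      let transitions :=
        if transitions.contains current then transitions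
        else transitions.insert current []
      if next_node ∈ transitions.getD current [] then transitions
      else transitions.insert current (transitions.getD current [] ++ [next_node]))
    (PySem.Dict.empty : PySem.Dict String (List String))).items

-- ===== PORT B =====
def infer_transitions_py_alt (node_sequence : List String) : List (String × List String) :=
  let pairs := node_sequence.zip (PySem.List.slice node_sequence (some 1) none)
  let keys := PySem.List.dedup (pairs.map Prod.fst)
  keys.map (fun c => (c, PySem.List.dedup ((pairs.filter (fun p => p.1 == c)).map Prod.snd)))

-- ===== PRECONDITION & SPEC =====
def Spec_infer_transitions_py (node_sequence : List String) (out : List (String × List String)) : Prop := out = infer_transitions_py_alt node_sequence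
instance (node_sequence : List String) (out : List (String × List String)) : Decidable (Spec_infer_transitions_py node_sequence out) := by unfold Spec_infer_transitions_py; infer_instance

-- ===== CLAIM (what is proved, stated in full; the proofs are below) =====
def Claim_equal_infer_transitions_py : Prop := ∀ (node_sequence : List String), Dom_infer_transitions_py node_sequence → Spec_infer_transitions_py node_sequence (infer_transitions_py node_sequence)

-- ===== LEMMAS AND PROOFS =====

-- A's loop step, named for the proofs (definitionally the port's fold body)
def pvStepA (d : PySem.Dict String (List String)) (c n : String) : PySem.Dict String (List String) :=
  let d := if d.contains c then d else d.insert c []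
  if n ∈ d.getD c [] then d else d.insert c (d.getD c [] ++ [n])

-- B's result as a function of the pair list
def pvSucc (ps : List (String × String)) (c : String) : List String :=
  PySem.List.dedup ((ps.filter (fun p => p.1 == c)).map Prod.snd)

def pvSpec (ps : List (String × String)) : List (String × List String) :=
  (PySem.List.dedup (ps.map Prod.fst)).map (fun c => (c, pvSucc ps c))

theorem pv_bridge_map (xs : List String) (m : Nat) (h : xs.length = m + 1) :
    (PySem.List.pyRange 0 ((m : Int)) 1).map
      (fun i => (PySem.List.pyGetD xs i "", PySem.List.pyGetD xs (i+1) "")) = xs.zip xs.tail := by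
  apply List.ext_getElem?
  intro k
  by_cases hk : k < m
  · rw [PySem.List.getElem?_map_pyRange_zero _ _ _ hk]
    have h1 : ((k:Int) + 1) = ((k+1 : Nat) : Int) := by push_cast; ring
    rw [h1]
    simp only [PySem.List.pyGetD_natCast]
    have hx : k < xs.length := by omega
    have hx1 : k + 1 < xs.length := by omega
    have ht : k < (xs.zip xs.tail).length := by simp; omega
    rw [List.getElem?_eq_getElem ht, List.getElem_zip]
    simp [List.getElem_tail, List.getD_eq_getElem?_getD, hx, hx1]
  · rw [List.getElem?_eq_none, List.getElem?_eq_none]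
    · simp; omega
    · simp [pysem]; omega

theorem pv_dedup_append_singleton (v : List String) (n : String) :
    PySem.List.dedup (v ++ [n]) =
      if n ∈ v then PySem.List.dedup v else PySem.List.dedup v ++ [n] := by
  show PySem.Set.ofList (v ++ [n]) = _
  rw [PySem.Set.ofList, List.foldl_append]
  show PySem.Set.add (PySem.Set.ofList v) n = _
  rw [PySem.Set.add]
  by_cases hm : n ∈ v
  · have hc : (PySem.Set.ofList v).contains n = true :=
      List.elem_eq_true_of_mem ((PySem.Set.mem_ofList v n).mpr hm)
    rw [if_pos hc, if_pos hm]; rfl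
  · have hc : ¬ (PySem.Set.ofList v).contains n = true := by
      intro hc
      exact hm ((PySem.Set.mem_ofList v n).mp (List.mem_of_elem_eq_true hc))
    rw [if_neg hc, if_neg hm]; rfl

theorem pv_find_beq (l : List String) (c : String) :
    l.find? (fun k => k == c) = if c ∈ l then some c else none := by
  induction l with
  | nil => simp
  | cons x xs ih =>
      by_cases hx : x = c
      · subst hx; simp
      · have hb : (x == c) = false := by simpa using hx
        simp [hb, ih, Ne.symm hx]

-- lookup facts for a dict whose items are pvSpec ps
theorem pv_contains_spec (d : PySem.Dict String (List String)) (ps : List (String × String))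
    (c : String) (hitems : d.items = pvSpec ps) :
    d.contains c = decide (c ∈ PySem.List.dedup (ps.map Prod.fst)) := by
  simp only [PySem.Dict.contains, hitems, pvSpec, List.any_map]
  show (PySem.List.dedup (ps.map Prod.fst)).any (fun k => k == c) = _
  simp [List.any_beq']

theorem pv_getD_spec (d : PySem.Dict String (List String)) (ps : List (String × String))
    (c : String) (hitems : d.items = pvSpec ps) :
    d.getD c [] = if c ∈ PySem.List.dedup (ps.map Prod.fst) then pvSucc ps c else [] := by
  rw [PySem.Dict.getD_eq_get?_getD]
  simp only [PySem.Dict.get?, hitems, pvSpec, List.find?_map]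
  have hcomp : ((fun p : String × List String => p.1 == c) ∘ (fun k => (k, pvSucc ps k)))
      = (fun k => k == c) := rfl
  rw [hcomp, pv_find_beq]
  split_ifs with h <;> simp

theorem pv_step_spec (d : PySem.Dict String (List String)) (ps : List (String × String))
    (c n : String) (hitems : d.items = pvSpec ps) :
    (pvStepA d c n).items = pvSpec (ps ++ [(c, n)]) := by
  have hkeys : PySem.List.dedup (ps.map Prod.fst ++ [c])
      = if c ∈ ps.map Prod.fst then PySem.List.dedup (ps.map Prod.fst)
        else PySem.List.dedup (ps.map Prod.fst) ++ [c] :=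
    pv_dedup_append_singleton _ c
  have hmemdedup : (c ∈ PySem.List.dedup (ps.map Prod.fst)) ↔ c ∈ ps.map Prod.fst := by
    simp [PySem.List.dedup_eq_ofList, PySem.Set.mem_ofList]
  have hsucc_ne : ∀ k, k ≠ c → pvSucc (ps ++ [(c, n)]) k = pvSucc ps k := by
    intro k hk
    have hb : ((c : String) == k) = false := by simpa using Ne.symm hk
    simp only [pvSucc, List.filter_append, List.filter_cons, hb]
    simp
  have hsucc_c : pvSucc (ps ++ [(c, n)]) c
      = if n ∈ (ps.filter (fun p => p.1 == c)).map Prod.snd then pvSucc ps c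
        else pvSucc ps c ++ [n] := by
    simp only [pvSucc, List.filter_append, List.filter_cons]
    simp only [show ((c, n).1 == c) = true by simp, if_pos, List.filter_nil, List.map_append,
      List.map_cons, List.map_nil]
    exact pv_dedup_append_singleton _ n
  have hgoalkeys : PySem.List.dedup ((ps ++ [(c, n)]).map Prod.fst)
      = PySem.List.dedup (ps.map Prod.fst ++ [c]) := by
    simp
  by_cases hc : c ∈ ps.map Prod.fst
  · -- key already present
    have hcd : d.contains c = true := by
      rw [pv_contains_spec d ps c hitems]; simp [hc]
    have hget : d.getD c [] = pvSucc ps c := by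
      rw [pv_getD_spec d ps c hitems, if_pos (hmemdedup.mpr hc)]
    have hmemiff : (n ∈ pvSucc ps c) ↔ n ∈ (ps.filter (fun p => p.1 == c)).map Prod.snd := by
      simp [pvSucc, PySem.List.dedup_eq_ofList, PySem.Set.mem_ofList]
    by_cases hn : n ∈ pvSucc ps c
    · have hA : pvStepA d c n = d := by
        simp [pvStepA, hcd, hget, hn]
      rw [hA, hitems]
      simp only [pvSpec, hgoalkeys, hkeys, if_pos hc]
      apply List.map_congr_left
      intro k hk
      by_cases hkc : k = c
      · subst hkc
        rw [hsucc_c, if_pos (hmemiff.mp hn)]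
      · rw [hsucc_ne k hkc]
    · have hA : pvStepA d c n = d.insert c (pvSucc ps c ++ [n]) := by
        simp [pvStepA, hcd, hget, hn]
      rw [hA, PySem.Dict.items_insert_of_contains _ _ hcd, hitems]
      simp only [pvSpec, hgoalkeys, hkeys, if_pos hc, List.map_map]
      apply List.map_congr_left
      intro k hk
      by_cases hkc : k = c
      · subst hkc
        simp only [Function.comp, beq_self_eq_true, if_pos]
        rw [hsucc_c, if_neg (fun hmm => hn (hmemiff.mpr hmm))]
      · have hb : ((k, pvSucc ps k).1 == c) = false := by simpa using hkc
        simp only [Function.comp, hb, Bool.false_eq_true, if_false]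
        rw [hsucc_ne k hkc]
  · -- new key
    have hcd : d.contains c = false := by
      rw [pv_contains_spec d ps c hitems]; simp [hc]
    have hfilter : ps.filter (fun p => p.1 == c) = [] := by
      rw [List.filter_eq_nil_iff]
      intro p hp hbeq
      exact hc (List.mem_map.mpr ⟨p, hp, by simpa using hbeq⟩)
    have hsc : pvSucc ps c = [] := by
      unfold pvSucc; rw [hfilter]; rfl
    have hd1c : (d.insert c []).contains c = true := PySem.Dict.contains_insert_self _ _ _
    have hd1get : (d.insert c []).getD c [] = ([] : List String) :=
      PySem.Dict.getD_insert_self d c [] []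
    have hA : pvStepA d c n = (d.insert c []).insert c [n] := by
      simp [pvStepA, hcd, hd1get]
    have hAitems : (pvStepA d c n).items =
        (d.items ++ [(c, [])]).map (fun q : String × List String => if q.1 == c then (c, [n]) else q) := by
      rw [hA, PySem.Dict.items_insert_of_contains _ _ hd1c,
        PySem.Dict.items_insert_of_not_contains d [] hcd]
    rw [hAitems, List.map_append, hitems]
    simp only [pvSpec, List.map_append, List.map_cons, List.map_nil, hkeys, if_neg hc,
      List.map_map]
    congr 1
    · apply List.map_congr_left
      intro k hk
      have hkc : k ≠ c := by
        intro h; subst h; exact hc (hmemdedup.mp hk)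
      have hb : ((k, pvSucc ps k).1 == c) = false := by simpa using hkc
      simp only [Function.comp, hb, Bool.false_eq_true, if_false]
      rw [hsucc_ne k hkc]
    · simp only [beq_self_eq_true, if_pos]
      rw [hsucc_c, if_neg (by simp [hfilter]), hsc]
      simp

theorem pv_fold_spec (ps : List (String × String)) :
    (ps.foldl (fun d p => pvStepA d p.1 p.2)
      (PySem.Dict.empty : PySem.Dict String (List String))).items = pvSpec ps := by
  induction ps using List.reverseRecOn with
  | nil => rfl
  | append_singleton ps p ih =>
      rw [List.foldl_append, List.foldl_cons, List.foldl_nil]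
      exact pv_step_spec _ ps p.1 p.2 ih

-- ===== VERDICT (by name: the statement is the Claim_ definition above) =====
theorem infer_transitions_py_spec : Claim_equal_infer_transitions_py := by
  intro ns _
  unfold Spec_infer_transitions_py infer_transitions_py infer_transitions_py_alt
  rw [PySem.List.slice_from_one]
  cases ns with
  | nil => rfl
  | cons x rest =>
      have hlen : (x :: rest).length = rest.length + 1 := by simp
      have hrange : PySem.List.len (x :: rest) - 1 = ((rest.length : Nat) : Int) := by
        simp [pysem]
      rw [hrange]
      have hfold :
          (PySem.List.pyRange 0 ((rest.length : Nat) : Int) 1).foldl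
            (fun t i => pvStepA t (PySem.List.pyGetD (x :: rest) i "")
              (PySem.List.pyGetD (x :: rest) (i + 1) "")) PySem.Dict.empty
          = ((x :: rest).zip (x :: rest).tail).foldl (fun t p => pvStepA t p.1 p.2)
              PySem.Dict.empty := by
        rw [← pv_bridge_map (x :: rest) rest.length hlen, List.foldl_map]
      show ((PySem.List.pyRange 0 ((rest.length : Nat) : Int) 1).foldl
          (fun t i => pvStepA t (PySem.List.pyGetD (x :: rest) i "")
            (PySem.List.pyGetD (x :: rest) (i + 1) "")) PySem.Dict.empty).items
        = pvSpec ((x :: rest).zip (x :: rest).tail)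
      rw [hfold]
      exact pv_fold_spec _
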